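-- pv_equiv track=rewrite | github.com/rossop/LeetCode | Python/Medium/2433_find_original_array_prefix_xor.py | findArrayBruteForce
-- ===== SOURCE A (Python) =====
-- from typing import List
--
-- def findArrayBruteForce(pref: List[int]) -> List[int]:
--     """
--     Find the original array from the prefix XOR array using a brute-force
--     approach.
--
--     This method is less efficient because it recalculates the XOR sum for
--     each element in the array.
--
--     Args:
--         pref (List[int]): A list of integers representing the prefix XOR
--         values.
--
--     Returns:
--         List[int]: The original array that corresponds to the given prefix
--         XOR array.
--
--     Time Complexity: O(n^2)
--         - We perform a nested loop, where for each element, we iterate over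
--         the entire array.
--     Space Complexity: O(n)
--         - We use an additional array to store the result, so the space
--         complexity is linear.
--     """
--     n: int = len(pref)
--     arr: List[int] = []
--     curr: int = 0
--
--     for i in range(n):
--         curr = pref[i]
--         for a in arr:
--             curr ^= a
--         arr.append(curr)
--
--     return arr
-- ===== SOURCE B (Python) =====
-- from typing import List
--
-- def findArrayBruteForce(pref: List[int]) -> List[int]:
--     # Single pass: each element is the XOR of two adjacent prefix values.
--     if not pref:
--         return []
--     return [pref[0]] + [b ^ a for a, b in zip(pref, pref[1:])]
-- ===== Notes on version B (the rewrite author's own statement) =====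
-- stated objective: faster
-- what changed: Replaced the quadratic rebuild (re-XORing the whole output list for every element) by the single-pass identity arr[i] = pref[i] ^ pref[i-1] over adjacent pairs.
import Mathlib
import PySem

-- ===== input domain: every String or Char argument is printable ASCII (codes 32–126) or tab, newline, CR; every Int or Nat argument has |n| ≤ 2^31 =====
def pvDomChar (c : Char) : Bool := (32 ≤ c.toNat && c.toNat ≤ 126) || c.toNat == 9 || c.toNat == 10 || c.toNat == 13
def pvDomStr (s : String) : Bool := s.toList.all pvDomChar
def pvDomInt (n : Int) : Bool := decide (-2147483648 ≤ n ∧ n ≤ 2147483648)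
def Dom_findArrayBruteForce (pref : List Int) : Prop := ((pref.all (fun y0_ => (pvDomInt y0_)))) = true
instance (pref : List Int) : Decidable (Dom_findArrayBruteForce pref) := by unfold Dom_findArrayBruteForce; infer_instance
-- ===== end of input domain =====

-- B replaces A's quadratic inner re-XOR loop by the single-pass identity arr[i] = pref[i] ^ pref[i-1] (faster, asymptotic).


-- ===== PORT A =====
-- for i in range(n): curr = pref[i]; for a in arr: curr ^= a; arr.append(curr)
def findArrayBruteForce (pref : List Int) : List Int :=
  pref.foldl (fun arr p => arr ++ [arr.foldl (fun curr a => PySem.Int.bxor curr a) p]) []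

-- ===== PORT B =====
-- if not pref: return [];  [pref[0]] + [b ^ a for a, b in zip(pref, pref[1:])]
def findArrayBruteForce_alt (pref : List Int) : List Int :=
  match pref with
  | [] => []
  | h :: t => h :: (pref.zip t).map (fun ab => PySem.Int.bxor ab.2 ab.1)

-- ===== PRECONDITION & SPEC =====
def Spec_findArrayBruteForce (pref : List Int) (out : List Int) : Prop := out = findArrayBruteForce_alt pref
instance (pref : List Int) (out : List Int) : Decidable (Spec_findArrayBruteForce pref out) := by unfold Spec_findArrayBruteForce; infer_instance

-- ===== CLAIM (what is proved, stated in full; the proofs are below) =====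
def Claim_equal_findArrayBruteForce : Prop := ∀ (pref : List Int), Dom_findArrayBruteForce pref → Spec_findArrayBruteForce pref (findArrayBruteForce pref)

-- ===== LEMMAS AND PROOFS =====

lemma bxor_negSucc_negSucc (m n : Nat) : PySem.Int.bxor (Int.negSucc m) (Int.negSucc n) = ((m ^^^ n : Nat) : Int) := by
  simp [PySem.Int.bxor, Int.negSucc_eq]
  omega

lemma bxor_ofNat_negSucc (m n : Nat) : PySem.Int.bxor (m : Int) (Int.negSucc n) = Int.negSucc (m ^^^ n) := by
  simp [PySem.Int.bxor, Int.negSucc_eq]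
  split <;> omega

lemma bxor_negSucc_ofNat (m n : Nat) : PySem.Int.bxor (Int.negSucc m) (n : Int) = Int.negSucc (m ^^^ n) := by
  simp [PySem.Int.bxor, Int.negSucc_eq]
  split <;> omega

lemma bxor_assoc (a b c : Int) :
    PySem.Int.bxor (PySem.Int.bxor a b) c = PySem.Int.bxor a (PySem.Int.bxor b c) := by
  cases a with
  | ofNat m => cases b with
    | ofNat n => cases c with
      | ofNat k => simp [PySem.Int.bxor_natCast, Nat.xor_assoc]
      | negSucc k => simp [PySem.Int.bxor_natCast, bxor_ofNat_negSucc, Nat.xor_assoc]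
    | negSucc n => cases c with
      | ofNat k => simp [bxor_ofNat_negSucc, bxor_negSucc_ofNat, Nat.xor_assoc]
      | negSucc k => simp [PySem.Int.bxor_natCast, bxor_ofNat_negSucc, bxor_negSucc_negSucc, Nat.xor_assoc]
  | negSucc m => cases b with
    | ofNat n => cases c with
      | ofNat k => simp [PySem.Int.bxor_natCast, bxor_negSucc_ofNat, Nat.xor_assoc]
      | negSucc k => simp [bxor_ofNat_negSucc, bxor_negSucc_ofNat, bxor_negSucc_negSucc, Nat.xor_assoc]
    | negSucc n => cases c with
      | ofNat k => simp [bxor_negSucc_ofNat, bxor_negSucc_negSucc, Nat.xor_assoc]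
      | negSucc k => simp [bxor_negSucc_ofNat, bxor_ofNat_negSucc, bxor_negSucc_negSucc, Nat.xor_assoc]

lemma bxor_zero_left (a : Int) : PySem.Int.bxor 0 a = a := by
  rw [PySem.Int.bxor_comm, PySem.Int.bxor_zero]

lemma bxor_cancel (s p : Int) : PySem.Int.bxor s (PySem.Int.bxor p s) = p := by
  rw [PySem.Int.bxor_comm p s, ← bxor_assoc, PySem.Int.bxor_self, bxor_zero_left]

-- the stream of consecutive XORs: xorStream s [p₁,p₂,…] = [p₁^s, p₂^p₁, …]
def xorStream (s : Int) : List Int → List Int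
  | [] => []
  | p :: rest => PySem.Int.bxor p s :: xorStream p rest

lemma foldl_bxor_shift (arr : List Int) (p : Int) :
    arr.foldl PySem.Int.bxor p = PySem.Int.bxor p (arr.foldl PySem.Int.bxor 0) := by
  induction arr generalizing p with
  | nil => simp [List.foldl, PySem.Int.bxor_zero]
  | cons a arr ih =>
      simp only [List.foldl]
      rw [ih (PySem.Int.bxor p a), ih (PySem.Int.bxor 0 a), bxor_zero_left, bxor_assoc]

lemma loopA (rest arr : List Int) :
    rest.foldl (fun arr p => arr ++ [arr.foldl (fun curr a => PySem.Int.bxor curr a) p]) arr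
      = arr ++ xorStream (arr.foldl PySem.Int.bxor 0) rest := by
  induction rest generalizing arr with
  | nil => simp [xorStream]
  | cons p rest ih =>
      simp only [List.foldl]
      rw [ih]
      have hc : (List.foldl (fun curr a => PySem.Int.bxor curr a) p arr)
          = PySem.Int.bxor p (arr.foldl PySem.Int.bxor 0) := foldl_bxor_shift arr p
      rw [hc]
      have hx : ((arr ++ [PySem.Int.bxor p (arr.foldl PySem.Int.bxor 0)]).foldl PySem.Int.bxor 0) = p := by
        rw [List.foldl_append]
        simp only [List.foldl]
        exact bxor_cancel _ _
      rw [hx, xorStream, List.append_assoc]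
      rfl

lemma zipMap_eq_xorStream (t : List Int) (s : Int) :
    ((s :: t).zip t).map (fun ab => PySem.Int.bxor ab.2 ab.1) = xorStream s t := by
  induction t generalizing s with
  | nil => rfl
  | cons b t ih => simp only [List.zip, List.zipWith, List.map, xorStream]; rw [← ih b]; rfl

-- ===== VERDICT (by name: the statement is the Claim_ definition above) =====
theorem findArrayBruteForce_spec : Claim_equal_findArrayBruteForce := by
  intro pref _
  unfold Spec_findArrayBruteForce findArrayBruteForce findArrayBruteForce_alt
  cases pref with
  | nil => rfl
  | cons h t =>
      rw [loopA]
      simp only [List.nil_append, List.foldl_nil]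
      rw [zipMap_eq_xorStream, xorStream, PySem.Int.bxor_zero]
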